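-- pv_equiv track=rewrite | github.com/YCWangLab/eProbe | src/eprobe/biophysics/fast_biophysics.py | _find_best_local_match
-- ===== SOURCE A (Python) =====
-- from typing import List, Dict, Tuple, Optional, Sequence
--
-- def _find_best_local_match(seq: str, rev_comp: str, min_match: int = 4) -> Tuple[int, int, int]:
--     """
--     Find the best local matching region between seq and its reverse complement.
--
--     Uses a sliding window approach to find complementary regions.
--
--     Returns:
--         Tuple of (score, best_start, best_len)
--     """
--     n = len(seq)
--     best_score = 0
--     best_start = 0
--     best_len = 0
--
--     # Try different offsets (allowing for hairpin loop)
--     for offset in range(min_match, n - min_match):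
--         # Compare seq[0:n-offset] with rev_comp[offset:n]
--         match_len = n - offset
--         if match_len < min_match:
--             continue
--
--         # Count matches in this alignment
--         matches = 0
--         current_run = 0
--         max_run = 0
--
--         for i in range(match_len):
--             if seq[i] == rev_comp[offset + i]:
--                 matches += 1
--                 current_run += 1
--                 max_run = max(max_run, current_run)
--             else:
--                 current_run = 0
--
--         # Score based on matches and longest consecutive run
--         score = matches * 2 + max_run * 3
--
--         if score > best_score:
--             best_score = score
--             best_start = offset
--             best_len = match_len
--
--     return best_score, best_start, best_len
-- ===== SOURCE B (Python) =====
-- from typing import Tuple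
--
--
-- def _find_best_local_match(seq: str, rev_comp: str, min_match: int = 4) -> Tuple[int, int, int]:
--     n = len(seq)
--     candidates = []
--     for offset in range(min_match, n - min_match):
--         m = n - offset
--         # cut positions: the mismatch indices of this diagonal, fenced by -1 and m
--         cuts = [-1] + [i for i in range(m) if seq[i] != rev_comp[offset + i]] + [m]
--         # longest match run = widest gap between consecutive cuts
--         max_run = max(b - a - 1 for a, b in zip(cuts, cuts[1:]))
--         matches = m - (len(cuts) - 2)
--         candidates.append((matches * 2 + max_run * 3, offset, m))
--     best = max(candidates, key=lambda t: t[0], default=(0, 0, 0))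
--     return best if best[0] > 0 else (0, 0, 0)
-- ===== Notes on version B (the rewrite author's own statement) =====
-- stated objective: alternative
-- what changed: Each diagonal is scored from its mismatch cut positions instead of a fused accumulator scan: B collects the mismatch indices fenced by -1 and m, derives the longest match run as the widest gap between consecutive cuts and the match count as m minus the number of cuts, and the winner is selected with max(key=..., default=...) instead of an in-loop best-so-far update.
import Mathlib
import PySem

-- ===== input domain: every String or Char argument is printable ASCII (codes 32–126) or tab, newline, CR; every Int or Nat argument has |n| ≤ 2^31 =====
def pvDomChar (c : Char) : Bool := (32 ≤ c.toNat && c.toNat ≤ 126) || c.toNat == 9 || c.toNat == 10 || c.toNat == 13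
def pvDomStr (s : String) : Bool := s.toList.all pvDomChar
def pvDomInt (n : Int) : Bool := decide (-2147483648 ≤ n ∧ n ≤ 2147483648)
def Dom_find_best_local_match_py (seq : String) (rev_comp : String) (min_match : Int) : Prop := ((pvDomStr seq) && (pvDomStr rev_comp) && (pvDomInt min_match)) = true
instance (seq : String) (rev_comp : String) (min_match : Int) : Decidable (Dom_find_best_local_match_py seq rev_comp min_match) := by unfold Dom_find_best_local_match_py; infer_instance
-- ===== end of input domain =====

-- B scores each diagonal from its mismatch cut positions (matched = length minus number of cuts,
-- longest run = widest gap between consecutive cuts, fenced by -1 and m) instead of A's fused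
-- matched/current_run/max_run accumulator scan, and selects the best candidate with
-- max(key=..., default=...); objective: alternative decomposition, same cost.


-- ===== PORT A =====
def find_best_local_match_py (seq : String) (rev_comp : String) (min_match : Int) : Int × Int × Int :=
  let n : Int := PySem.Str.len seq
  (PySem.List.pyRange min_match (n - min_match) 1).foldl
    (fun (st : Int × Int × Int) (offset : Int) =>
      let match_len := n - offset
      if match_len < min_match then st
      else
        let r := (PySem.List.pyRange 0 match_len 1).foldl
          (fun (t : Int × Int × Int) (i : Int) =>
            if PySem.Str.pyGet? seq i == PySem.Str.pyGet? rev_comp (offset + i) then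
              (t.1 + 1, t.2.1 + 1, max t.2.2 (t.2.1 + 1))
            else (t.1, (0 : Int), t.2.2))
          ((0 : Int), (0 : Int), (0 : Int))
        let score := r.1 * 2 + r.2.2 * 3
        if score > st.1 then (score, offset, match_len) else st)
    (0, 0, 0)

-- ===== PORT B =====
def find_best_local_match_py_alt (seq : String) (rev_comp : String) (min_match : Int) : Int × Int × Int :=
  let n : Int := PySem.Str.len seq
  let candidates := (PySem.List.pyRange min_match (n - min_match) 1).map
    (fun (offset : Int) =>
      let m := n - offset
      let cuts := [(-1 : Int)] ++
        ((PySem.List.pyRange 0 m 1).filter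
          (fun i => !(PySem.Str.pyGet? seq i == PySem.Str.pyGet? rev_comp (offset + i)))) ++ [m]
      -- Python's max over the (always nonempty) generator zip(cuts, cuts[1:]): getD is never used
      let max_run := (((cuts.zip cuts.tail).map (fun p => p.2 - p.1 - 1)).max?).getD 0
      let matched := m - ((cuts.length : Int) - 2)
      (matched * 2 + max_run * 3, offset, m))
  let best := PySem.List.maxD candidates (fun t => t.1) ((0 : Int), (0 : Int), (0 : Int))
  if best.1 > 0 then best else (0, 0, 0)

-- ===== PRECONDITION & SPEC =====
-- Pre_ excludes exactly the inputs where Python A raises: a negative min_match always reaches an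
-- out-of-range index (IndexError), and when the offset loop is nonempty the diagonal indexes
-- rev_comp up to len(seq)-1, an IndexError if rev_comp is shorter than seq.
def Pre_find_best_local_match_py (seq : String) (rev_comp : String) (min_match : Int) : Prop :=
  0 ≤ min_match ∧ (2 * min_match < PySem.Str.len seq → PySem.Str.len seq ≤ PySem.Str.len rev_comp)
instance (seq : String) (rev_comp : String) (min_match : Int) : Decidable (Pre_find_best_local_match_py seq rev_comp min_match) := by unfold Pre_find_best_local_match_py; infer_instance

def pvWitness_find_best_local_match_py : String × String × Int := ("ACGTTAACGT", "ACGTTAACGT", 2)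

def Spec_find_best_local_match_py (seq : String) (rev_comp : String) (min_match : Int) (out : Int × Int × Int) : Prop := out = find_best_local_match_py_alt seq rev_comp min_match
instance (seq : String) (rev_comp : String) (min_match : Int) (out : Int × Int × Int) : Decidable (Spec_find_best_local_match_py seq rev_comp min_match out) := by unfold Spec_find_best_local_match_py; infer_instance

-- ===== CLAIM (what is proved, stated in full; the proofs are below) =====
def Claim_equal_find_best_local_match_py : Prop := ∀ (seq : String) (rev_comp : String) (min_match : Int), Dom_find_best_local_match_py seq rev_comp min_match → Pre_find_best_local_match_py seq rev_comp min_match → Spec_find_best_local_match_py seq rev_comp min_match (find_best_local_match_py seq rev_comp min_match)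

-- ===== LEMMAS AND PROOFS =====

-- A's inner fused accumulator step, abstracted over the boolean of the comparison
def pvFused (t : Int × Int × Int) (b : Bool) : Int × Int × Int :=
  if b then (t.1 + 1, t.2.1 + 1, max t.2.2 (t.2.1 + 1)) else (t.1, (0 : Int), t.2.2)

-- the final current-run value of A's scan
def pvEndRun (c : Int) : List Bool → Int
  | [] => c
  | b :: xs => if b then pvEndRun (c + 1) xs else pvEndRun 0 xs

-- the max-run contribution of A's scan, with open prefix run c
def pvG (c : Int) : List Bool → Int
  | [] => 0
  | b :: xs => if b then max (c + 1) (pvG (c + 1) xs) else pvG 0 xs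

-- B's maximal gap, as a recursion over the inner cut positions with a previous boundary
def pvGm (prev : Int) : List Int → Int → Int
  | [], m => m - prev - 1
  | x :: xs, m => max (x - prev - 1) (pvGm x xs m)

theorem pvFused_foldl (l : List Bool) (m c r : Int) (hr : 0 ≤ r) :
    l.foldl pvFused (m, c, r) = (m + (l.count true : Int), pvEndRun c l, max r (pvG c l)) := by
  induction l generalizing m c r with
  | nil => simp only [List.foldl_nil, List.count_nil, pvG, pvEndRun]; simp; omega
  | cons b xs ih =>
    cases b
    · simp only [List.foldl_cons, pvFused, Bool.false_eq_true, if_false, pvG, pvEndRun]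
      rw [ih m 0 r hr]
      simp [List.count_cons]
    · simp only [List.foldl_cons, pvFused, if_true, pvG, pvEndRun]
      rw [ih (m + 1) (c + 1) (max r (c + 1)) (by omega)]
      simp only [List.count_cons, beq_self_eq_true, if_true, Prod.mk.injEq, max_assoc,
        and_true]
      push_cast
      omega

theorem pvG_nonneg (l : List Bool) (c : Int) : 0 ≤ pvG c l := by
  induction l generalizing c with
  | nil => simp [pvG]
  | cons b xs ih =>
    cases b
    · simpa [pvG] using ih 0
    · simp only [pvG, if_true, le_max_iff]
      right; exact ih (c + 1)

theorem pvMaxSome (G : List Int) (a g : Int) (h : G.max? = some g) :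
    (a :: G).max? = some (max a g) := by
  rw [List.max?_cons, h]
  rfl

-- the widest-gap generator of B equals the recursion pvGm
theorem pvZipMax (l : List Int) (prev m : Int) :
    ((((prev :: (l ++ [m])).zip (l ++ [m])).map (fun p => p.2 - p.1 - 1)).max?) =
      some (pvGm prev l m) := by
  induction l generalizing prev with
  | nil => simp [pvGm, List.max?_cons]
  | cons x xs ih =>
    simp only [List.cons_append, List.zip_cons_cons, List.map_cons]
    exact pvMaxSome _ _ _ (ih x)

-- count bookkeeping: filtered mismatches + matched count = range length
theorem pvCount (r : List Int) (c : Int → Bool) :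
    ((r.filter (fun i => !c i)).length : Int) + ((r.map c).count true : Int) = r.length := by
  induction r with
  | nil => simp
  | cons x xs ih =>
    cases hx : c x <;>
      simp [List.filter_cons, hx, ← ih] <;> push_cast <;> ring

-- MAIN: B's widest gap between cuts = A's longest run (with open prefix run c)
theorem pvMain (cmp : Int → Bool) (k : Nat) :
    ∀ (s t c : Int), 0 ≤ c → s ≤ t → (t - s).toNat ≤ k →
    pvGm (s - 1 - c) ((PySem.List.pyRange s t 1).filter (fun i => !cmp i)) t =
      max c (pvG c ((PySem.List.pyRange s t 1).map cmp)) := by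
  induction k with
  | zero =>
    intro s t c hc hst h
    have hts : t = s := by omega
    subst hts
    rw [PySem.List.pyRange_one_eq_nil le_rfl]
    simp [pvGm, pvG]
    omega
  | succ k ih =>
    intro s t c hc hst h
    by_cases hlt : s < t
    · rw [PySem.List.pyRange_one_cons hlt]
      cases hcmp : cmp s
      · -- mismatch at s: a cut
        simp only [List.filter_cons, List.map_cons, hcmp, Bool.not_false, ite_true,
          pvGm, pvG, Bool.false_eq_true, if_false]
        have := ih (s + 1) t 0 le_rfl (by omega) (by omega)
        rw [show s + 1 - 1 - 0 = s by ring] at this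
        rw [show (List.filter (fun i => !cmp i) (PySem.List.pyRange (s+1) t 1)) =
            (PySem.List.pyRange (s+1) t 1).filter (fun i => !cmp i) from rfl, this]
        have hnn := pvG_nonneg ((PySem.List.pyRange (s+1) t 1).map cmp) 0
        have hgap : s - (s - 1 - c) - 1 = c := by ring
        rw [hgap, max_eq_right hnn]
      · -- match at s: no cut, run extends
        simp only [List.filter_cons, List.map_cons, hcmp, Bool.not_true, pvG, ite_true,
          Bool.false_eq_true, if_false]
        have := ih (s + 1) t (c + 1) (by omega) (by omega) (by omega)
        rw [show s + 1 - 1 - (c + 1) = s - 1 - c by ring] at this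
        rw [this, ← max_assoc, max_eq_right (by omega : c ≤ c + 1)]
    · have hts : t = s := by omega
      subst hts
      rw [PySem.List.pyRange_one_eq_nil le_rfl]
      simp [pvGm, pvG]
      omega

-- the best-so-far selection step shared by A's outer loop and Python's max(key=...)
def pvStep (acc t : Int × Int × Int) : Int × Int × Int := if t.1 > acc.1 then t else acc

theorem pvStep_fst_le (l : List (Int × Int × Int)) (i : Int × Int × Int) :
    i.1 ≤ (l.foldl pvStep i).1 := by
  induction l generalizing i with
  | nil => exact le_rfl
  | cons t l ih =>
    simp only [List.foldl_cons]
    refine le_trans ?_ (ih (pvStep i t))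
    unfold pvStep; split <;> omega

theorem pvStep_init_congr (l : List (Int × Int × Int)) (a b : Int × Int × Int)
    (h : a.1 = b.1) :
    (l.foldl pvStep a = l.foldl pvStep b ∧ a.1 < (l.foldl pvStep a).1) ∨
      (l.foldl pvStep a = a ∧ l.foldl pvStep b = b) := by
  induction l generalizing a b with
  | nil => right; simp
  | cons t l ih =>
    simp only [List.foldl_cons]
    by_cases ht : t.1 > a.1
    · left
      have ha : pvStep a t = t := by unfold pvStep; rw [if_pos ht]
      have hb : pvStep b t = t := by unfold pvStep; rw [if_pos (h ▸ ht)]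
      rw [ha, hb]
      exact ⟨rfl, lt_of_lt_of_le ht (pvStep_fst_le l t)⟩
    · have ha : pvStep a t = a := by unfold pvStep; rw [if_neg ht]
      have hb : pvStep b t = b := by unfold pvStep; rw [if_neg (fun hh => ht (h ▸ hh))]
      rw [ha, hb]; exact ih a b h

theorem pvMax?_cons_cons (c t : Int × Int × Int) (ts : List (Int × Int × Int)) :
    PySem.List.max? (c :: t :: ts) (fun x => x.1) =
      PySem.List.max? (pvStep c t :: ts) (fun x => x.1) := by
  unfold PySem.List.max? pvStep
  simp only [List.foldl_cons]
  congr 1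
  by_cases h : c.1 < t.1
  · simp [gt_iff_lt, h]
  · simp [gt_iff_lt, h]

theorem pvMax?_some (l : List (Int × Int × Int)) (c : Int × Int × Int) :
    PySem.List.max? (c :: l) (fun x => x.1) = some (l.foldl pvStep c) := by
  induction l generalizing c with
  | nil => rfl
  | cons t ts ih =>
    rw [pvMax?_cons_cons, ih (pvStep c t)]
    rfl

theorem pvOuter (l : List (Int × Int × Int)) (hpos : ∀ t ∈ l, 0 ≤ t.1) :
    l.foldl pvStep ((0 : Int), (0 : Int), (0 : Int)) =
      (let best := PySem.List.maxD l (fun t => t.1) ((0 : Int), (0 : Int), (0 : Int));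
       if best.1 > 0 then best else (0, 0, 0)) := by
  cases l with
  | nil => simp [PySem.List.maxD, PySem.List.max?]
  | cons c cs =>
    have hmax : PySem.List.maxD (c :: cs) (fun t => t.1) ((0 : Int), (0 : Int), (0 : Int)) =
        cs.foldl pvStep c := by
      unfold PySem.List.maxD
      rw [pvMax?_some]
      rfl
    simp only [List.foldl_cons, hmax]
    by_cases hc : c.1 > 0
    · have h1 : pvStep (0, 0, 0) c = c := by unfold pvStep; rw [if_pos hc]
      rw [h1, if_pos (lt_of_lt_of_le hc (pvStep_fst_le cs c))]
    · have hc0 : c.1 = 0 := le_antisymm (by omega) (hpos c (by simp))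
      have h1 : pvStep (0, 0, 0) c = (0, 0, 0) := by unfold pvStep; rw [if_neg hc]
      rw [h1]
      rcases pvStep_init_congr cs ((0 : Int), (0 : Int), (0 : Int)) c (by simp [hc0]) with
        ⟨heq, hlt⟩ | ⟨ha, hb⟩
      · rw [heq, if_pos (by rw [← heq]; exact hlt)]
      · rw [ha, hb, if_neg (by omega : ¬ c.1 > 0)]

-- ===== VERDICT (by name: the statement is the Claim_ definition above) =====
theorem find_best_local_match_py_spec : Claim_equal_find_best_local_match_py := by
  intro seq rev_comp min_match _hdom hpre
  unfold Spec_find_best_local_match_py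
  unfold find_best_local_match_py find_best_local_match_py_alt
  simp only []
  set n : Int := PySem.Str.len seq with hn
  set cand : Int → Int × Int × Int := fun offset =>
    let m := n - offset
    let cuts := [(-1 : Int)] ++
      ((PySem.List.pyRange 0 m 1).filter
        (fun i => !(PySem.Str.pyGet? seq i == PySem.Str.pyGet? rev_comp (offset + i)))) ++ [m]
    let max_run := (((cuts.zip cuts.tail).map (fun p => p.2 - p.1 - 1)).max?).getD 0
    let matched := m - ((cuts.length : Int) - 2)
    (matched * 2 + max_run * 3, offset, m) with hcand
  have hcand_eq : ∀ offset : Int, min_match ≤ offset → offset < n - min_match →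
      cand offset =
        (((((PySem.List.pyRange 0 (n - offset) 1).map
            (fun i => PySem.Str.pyGet? seq i == PySem.Str.pyGet? rev_comp (offset + i))).count true : Int)) * 2 +
          (max 0 (pvG 0 ((PySem.List.pyRange 0 (n - offset) 1).map
            (fun i => PySem.Str.pyGet? seq i == PySem.Str.pyGet? rev_comp (offset + i))))) * 3,
          offset, n - offset) := by
    intro offset h1 h2
    have hmm : 0 ≤ min_match := hpre.1
    have hm0 : 0 ≤ n - offset := by omega
    simp only [hcand]
    set cmp : Int → Bool := fun i => PySem.Str.pyGet? seq i == PySem.Str.pyGet? rev_comp (offset + i)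
    set F := (PySem.List.pyRange 0 (n - offset) 1).filter (fun i => !cmp i) with hF
    have hzip : ([(-1 : Int)] ++ F ++ [n - offset]) = (-1 : Int) :: (F ++ [n - offset]) := by simp
    have htail : ((-1 : Int) :: (F ++ [n - offset])).tail = F ++ [n - offset] := rfl
    rw [hzip]
    have hmaxrun := pvZipMax F (-1) (n - offset)
    have hmain := pvMain cmp (n - offset).toNat 0 (n - offset) 0 le_rfl hm0 (by omega)
    rw [show (0 : Int) - 1 - 0 = -1 by ring, ← hF] at hmain
    have hcount := pvCount (PySem.List.pyRange 0 (n - offset) 1) cmp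
    rw [PySem.List.length_pyRange_one, ← hF] at hcount
    have hlen : ((((-1 : Int) :: (F ++ [n - offset])).length : Int) - 2) = (F.length : Int) := by
      simp; push_cast; ring
    simp only [htail, hmaxrun, Option.getD_some, hlen, hmain]
    have hmatches : n - offset - (F.length : Int) =
        (((PySem.List.pyRange 0 (n - offset) 1).map cmp).count true : Int) := by
      have : ((n - offset).toNat : Int) = n - offset := by omega
      omega
    rw [hmatches]
  -- rewrite A's outer fold into pvStep over the mapped candidates
  have hA : (PySem.List.pyRange min_match (n - min_match) 1).foldl
      (fun (st : Int × Int × Int) (offset : Int) =>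
        let match_len := n - offset
        if match_len < min_match then st
        else
          let r := (PySem.List.pyRange 0 match_len 1).foldl
            (fun (t : Int × Int × Int) (i : Int) =>
              if PySem.Str.pyGet? seq i == PySem.Str.pyGet? rev_comp (offset + i) then
                (t.1 + 1, t.2.1 + 1, max t.2.2 (t.2.1 + 1))
              else (t.1, (0 : Int), t.2.2))
            ((0 : Int), (0 : Int), (0 : Int))
          let score := r.1 * 2 + r.2.2 * 3
          if score > st.1 then (score, offset, match_len) else st)
      ((0 : Int), (0 : Int), (0 : Int)) =
      ((PySem.List.pyRange min_match (n - min_match) 1).map cand).foldl pvStep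
        ((0 : Int), (0 : Int), (0 : Int)) := by
    rw [List.foldl_map]
    apply PySem.List.foldl_congr_mem
    intro acc offset hmem
    have hoff : min_match ≤ offset ∧ offset < n - min_match :=
      (PySem.List.mem_pyRange_one).1 hmem
    have hskip : ¬ (n - offset < min_match) := by omega
    rw [if_neg hskip]
    have hinner : (PySem.List.pyRange 0 (n - offset) 1).foldl
        (fun (t : Int × Int × Int) (i : Int) =>
          if PySem.Str.pyGet? seq i == PySem.Str.pyGet? rev_comp (offset + i) then
            (t.1 + 1, t.2.1 + 1, max t.2.2 (t.2.1 + 1))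
          else (t.1, (0 : Int), t.2.2))
        ((0 : Int), (0 : Int), (0 : Int)) =
        ((PySem.List.pyRange 0 (n - offset) 1).map
          (fun (i : Int) => PySem.Str.pyGet? seq i == PySem.Str.pyGet? rev_comp (offset + i))).foldl
          pvFused ((0 : Int), (0 : Int), (0 : Int)) := by
      rw [List.foldl_map]; rfl
    rw [hinner, pvFused_foldl _ _ _ _ le_rfl, hcand_eq offset hoff.1 hoff.2]
    simp only [pvStep, zero_add]
  have hpos : ∀ t ∈ (PySem.List.pyRange min_match (n - min_match) 1).map cand, 0 ≤ t.1 := by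
    intro t ht
    simp only [List.mem_map] at ht
    obtain ⟨o, ho, hto⟩ := ht
    have hoff : min_match ≤ o ∧ o < n - min_match := (PySem.List.mem_pyRange_one).1 ho
    rw [← hto, hcand_eq o hoff.1 hoff.2]
    have := pvG_nonneg ((PySem.List.pyRange 0 (n - o) 1).map
      (fun i => PySem.Str.pyGet? seq i == PySem.Str.pyGet? rev_comp (o + i))) 0
    positivity
  rw [hA, pvOuter _ hpos]
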